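-- pv_equiv track=rewrite | github.com/sggutier/Competitive-Programming-Solutions | UVa/10007.py | prec
-- ===== SOURCE A (Python) =====
-- import math
--
-- def prec(n):
--     n += 1
--     ans = [0 for i in range(n)]
--     ans[0] = 1
--     for i in range(1, n):
--         for j in range(0, i):
--             ans[i] += ans[j]*ans[i-1-j]
--     for i in range(1, n):
--         ans[i] *= math.factorial(i)
--     return ans
-- ===== SOURCE B (Python) =====
-- def prec(n):
--     # Linear Catalan recurrence instead of the quadratic convolution:
--     # C(i) = C(i-1) * 2*(2*i-1) // (i+1), answer[i] = C(i) * i!.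
--     ans = [1]
--     c = 1
--     f = 1
--     for i in range(1, n + 1):
--         c = c * 2 * (2 * i - 1) // (i + 1)
--         f *= i
--         ans.append(c * f)
--     return ans
-- ===== Notes on version B (the rewrite author's own statement) =====
-- stated objective: faster
-- what changed: Replaces A's O(n^2)-term Catalan convolution (nested loops, quadratic state rebuild) plus per-entry math.factorial calls by a single pass using the linear recurrence C(i)=C(i-1)*2*(2i-1)//(i+1) with a running factorial.
-- outside the precondition, e.g. on prec(-1): A raises IndexError, B returns [1]
import Mathlib
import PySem

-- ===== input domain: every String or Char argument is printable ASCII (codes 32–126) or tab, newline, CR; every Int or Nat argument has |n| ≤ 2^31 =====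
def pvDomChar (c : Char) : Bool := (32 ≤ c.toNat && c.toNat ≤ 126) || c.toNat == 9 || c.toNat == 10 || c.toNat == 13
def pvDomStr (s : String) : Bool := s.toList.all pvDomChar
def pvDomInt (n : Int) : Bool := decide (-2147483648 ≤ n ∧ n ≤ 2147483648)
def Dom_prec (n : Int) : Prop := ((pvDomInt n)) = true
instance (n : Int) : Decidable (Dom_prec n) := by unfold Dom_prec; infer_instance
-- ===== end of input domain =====

-- B replaces A's O(n^2)-multiplication Catalan convolution by the linear recurrence
-- C(i) = C(i-1)*2*(2i-1)/(i+1) with a running factorial (faster: asymptotically fewer big-int ops).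

-- ===== PORT A =====
-- inner loop: for j in range(0, i): ans[i] += ans[j]*ans[i-1-j]
def precInner (i : Int) (ans : List Int) : List Int :=
  (PySem.List.pyRange 0 i 1).foldl
    (fun a j => PySem.List.pySetD a i
      (PySem.List.pyGetD a i 0 + PySem.List.pyGetD a j 0 * PySem.List.pyGetD a (i - 1 - j) 0))
    ans

def prec (n : Int) : List Int :=
  let n1 := n + 1
  let ans0 : List Int := (PySem.List.pyRange 0 n1 1).map (fun _ => (0 : Int))
  -- `ans[0] = 1` raises IndexError on the empty list; Pre_prec (0 ≤ n) excludes that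
  let ans1 := PySem.List.pySetD ans0 0 1
  let ans2 := (PySem.List.pyRange 1 n1 1).foldl (fun a i => precInner i a) ans1
  -- math.factorial(i): in this loop i ≥ 1, so i.toNat is exact
  (PySem.List.pyRange 1 n1 1).foldl
    (fun a i => PySem.List.pySetD a i (PySem.List.pyGetD a i 0 * (Nat.factorial i.toNat : Int)))
    ans2

-- ===== PORT B =====
def prec_alt (n : Int) : List Int :=
  ((PySem.List.pyRange 1 (n + 1) 1).foldl
    (fun (st : List Int × Int × Int) i =>
      let c := PySem.Int.floordiv (st.2.1 * 2 * (2 * i - 1)) (i + 1)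
      let f := st.2.2 * i
      (st.1 ++ [c * f], c, f))
    ([1], 1, 1)).1

-- ===== PRECONDITION & SPEC =====
-- Pre_prec: A raises IndexError (ans[0] on an empty list) for n < 0; exactly 0 ≤ n returns.
def Pre_prec (n : Int) : Prop := 0 ≤ n
instance (n : Int) : Decidable (Pre_prec n) := by unfold Pre_prec; infer_instance
def pvWitness_prec : Int := (3)

def Spec_prec (n : Int) (out : List Int) : Prop := out = prec_alt n
instance (n : Int) (out : List Int) : Decidable (Spec_prec n out) := by unfold Spec_prec; infer_instance

-- ===== CLAIM (what is proved, stated in full; the proofs are below) =====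
def Claim_equal_prec : Prop := ∀ (n : Int), Dom_prec n → Pre_prec n → Spec_prec n (prec n)

-- ===== LEMMAS AND PROOFS =====

-- the common reference value: entry i is catalan(i) * i!
def catI (j : Nat) : Int := (catalan j : Int)
def cfI (j : Nat) : Int := catI j * (Nat.factorial j : Int)

lemma cat_rec (m : Nat) : (m + 2) * catalan (m + 1) = 2 * (2 * m + 1) * catalan m := by
  have h1 := succ_mul_catalan_eq_centralBinom m
  have h2 := succ_mul_catalan_eq_centralBinom (m + 1)
  have h3 := Nat.succ_mul_centralBinom_succ m
  refine Nat.eq_of_mul_eq_mul_left (show 0 < m + 1 by omega) ?_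
  calc (m + 1) * ((m + 2) * catalan (m + 1))
      = (m + 1) * ((m + 1 + 1) * catalan (m + 1)) := by ring_nf
    _ = (m + 1) * (m + 1).centralBinom := by rw [h2]
    _ = 2 * (2 * m + 1) * m.centralBinom := h3
    _ = 2 * (2 * m + 1) * ((m + 1) * catalan m) := by rw [h1]
    _ = (m + 1) * (2 * (2 * m + 1) * catalan m) := by ring

-- B-side loop invariant
lemma alt_loop (m : Nat) :
    ((PySem.List.pyRange 1 ((m : Int) + 1) 1).foldl
      (fun (st : List Int × Int × Int) i =>
        let c := PySem.Int.floordiv (st.2.1 * 2 * (2 * i - 1)) (i + 1)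
        let f := st.2.2 * i
        (st.1 ++ [c * f], c, f))
      ([1], 1, 1))
    = ((List.range (m + 1)).map cfI, catI m, (Nat.factorial m : Int)) := by
  induction m with
  | zero =>
      rw [show ((0 : Nat) : Int) + 1 = 1 by norm_num, PySem.List.pyRange_one_eq_nil (le_refl _)]
      simp [List.foldl, catI, cfI, catalan_zero, Nat.factorial]
  | succ m ih =>
      have hcast : ((m + 1 : Nat) : Int) + 1 = ((m : Int) + 1) + 1 := by push_cast; ring
      rw [hcast, PySem.List.pyRange_one_succ_right (by omega), List.foldl_append, ih]
      simp only [List.foldl]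
      have hc : PySem.Int.floordiv (catI m * 2 * (2 * ((m : Int) + 1) - 1)) (((m : Int) + 1) + 1)
          = catI (m + 1) := by
        have hnum : catI m * 2 * (2 * ((m : Int) + 1) - 1) = catI (m + 1) * (((m : Int) + 1) + 1) := by
          have := cat_rec m
          have h' : ((m + 2) * catalan (m + 1) : Int) = (2 * (2 * m + 1) * catalan m : Int) := by
            exact_mod_cast congrArg (Nat.cast : Nat → Int) this
          unfold catI
          push_cast at h' ⊢
          nlinarith [h']
        rw [hnum, PySem.Int.floordiv_eq_ediv_of_pos (by omega),
          Int.mul_ediv_cancel _ (by omega)]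
      have hf : (Nat.factorial m : Int) * ((m : Int) + 1) = (Nat.factorial (m + 1) : Int) := by
        push_cast [Nat.factorial_succ]; ring
      simp only [hc, hf]
      rw [show List.range (m + 1 + 1) = List.range (m + 1) ++ [m + 1] from List.range_succ]
      simp [cfI]

-- position-k reads/writes on a list of shape A ++ x :: B with A.length = k
lemma getD_append_len (A : List Int) (x : Int) (B : List Int) (d : Int) :
    (A ++ x :: B).getD A.length d = x := by
  rw [List.getD_append_right _ _ _ _ (le_refl _)]; simp

lemma set_append_len (A : List Int) (x v : Int) (B : List Int) :
    (A ++ x :: B).set A.length v = A ++ v :: B := by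
  rw [List.set_append]; simp

-- the Catalan convolution as an Int range sum
lemma cat_sum (s : Nat) :
    (catalan (s + 1) : Int) = ∑ j ∈ Finset.range (s + 1), catI j * catI (s - j) := by
  rw [catalan_succ s]
  rw [show (∑ i : Fin (s + 1), catalan i * catalan (s - i))
      = ∑ j ∈ Finset.range (s + 1), catalan j * catalan (s - j) from
    Fin.sum_univ_eq_sum_range (fun j => catalan j * catalan (s - j)) (s + 1)]
  push_cast
  rfl

-- A's inner loop: partial convolution sums accumulate at position k
lemma inner_fold (m k : Nat) (t : Nat) (ht : t ≤ k) :
    (PySem.List.pyRange 0 (t : Int) 1).foldl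
      (fun a j => PySem.List.pySetD a (k : Int)
        (PySem.List.pyGetD a (k : Int) 0 +
          PySem.List.pyGetD a j 0 * PySem.List.pyGetD a ((k : Int) - 1 - j) 0))
      ((List.range k).map catI ++ (0 : Int) :: List.replicate (m - k) 0)
    = (List.range k).map catI ++
        (∑ j ∈ Finset.range t, catI j * catI (k - 1 - j)) :: List.replicate (m - k) 0 := by
  induction t with
  | zero =>
      rw [show ((0 : Nat) : Int) = 0 by norm_num, PySem.List.pyRange_one_eq_nil (le_refl _)]
      simp [List.foldl]
  | succ t ih =>
      have ht' : t ≤ k := by omega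
      have hcast : ((t + 1 : Nat) : Int) = (t : Int) + 1 := by push_cast; ring
      rw [hcast, PySem.List.pyRange_one_succ_right (by omega), List.foldl_append, ih ht']
      simp only [List.foldl]
      set A := (List.range k).map catI with hA
      have hAlen : A.length = k := by simp [hA]
      set S := ∑ j ∈ Finset.range t, catI j * catI (k - 1 - j) with hS
      have hk0 : PySem.List.pyGetD (A ++ S :: List.replicate (m - k) 0) (k : Int) 0 = S := by
        rw [PySem.List.pyGetD_natCast, ← hAlen, getD_append_len]
      have htv : PySem.List.pyGetD (A ++ S :: List.replicate (m - k) 0) ((t : Nat) : Int) 0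
          = catI t := by
        rw [PySem.List.pyGetD_natCast, List.getD_append _ _ _ _ (by omega : t < A.length),
          hA, PySem.List.getD_map_range _ _ _ _ (by omega)]
      have hidx : (k : Int) - 1 - (t : Int) = ((k - 1 - t : Nat) : Int) := by omega
      have hktv : PySem.List.pyGetD (A ++ S :: List.replicate (m - k) 0) ((k : Int) - 1 - (t : Int)) 0
          = catI (k - 1 - t) := by
        rw [hidx, PySem.List.pyGetD_natCast, List.getD_append _ _ _ _ (by omega : k - 1 - t < A.length),
          hA, PySem.List.getD_map_range _ _ _ _ (by omega)]
      rw [hk0, htv, hktv, PySem.List.pySetD_natCast, ← hAlen, set_append_len, hAlen]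
      rw [Finset.sum_range_succ]

-- A's inner loop produces catalan(k) at position k
lemma inner_apply (m k : Nat) (h1 : 1 ≤ k) :
    precInner (k : Int) ((List.range k).map catI ++ (0 : Int) :: List.replicate (m - k) 0)
    = (List.range k).map catI ++ catI k :: List.replicate (m - k) 0 := by
  unfold precInner
  rw [inner_fold m k k (le_refl _)]
  obtain ⟨s, rfl⟩ : ∃ s, k = s + 1 := ⟨k - 1, by omega⟩
  have : (∑ j ∈ Finset.range (s + 1), catI j * catI (s + 1 - 1 - j)) = catI (s + 1) := by
    unfold catI
    rw [cat_sum s]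
    exact Finset.sum_congr rfl (fun j _ => by simp [catI])
  rw [this]

-- A's first phase
lemma phase1 (m k : Nat) (h1 : 1 ≤ k) (hk : k ≤ m + 1) :
    (PySem.List.pyRange 1 (k : Int) 1).foldl (fun a i => precInner i a)
      ((1 : Int) :: List.replicate m 0)
    = (List.range k).map catI ++ List.replicate (m + 1 - k) 0 := by
  induction k with
  | zero => omega
  | succ k ih =>
      by_cases hk1 : k = 0
      · subst hk1
        rw [show ((1 : Nat) : Int) = 1 by norm_num, PySem.List.pyRange_one_eq_nil (le_refl _)]
        simp [List.foldl, catI, catalan_zero]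
      · have hcast : ((k + 1 : Nat) : Int) = (k : Int) + 1 := by push_cast; ring
        rw [hcast, PySem.List.pyRange_one_succ_right (by exact_mod_cast Nat.one_le_iff_ne_zero.2 hk1),
          List.foldl_append, ih (by omega) (by omega)]
        simp only [List.foldl]
        have hrep : List.replicate (m + 1 - k) (0 : Int) = (0 : Int) :: List.replicate (m - k) 0 := by
          rw [show m + 1 - k = (m - k) + 1 by omega, List.replicate_succ]
        rw [hrep, inner_apply m k (by omega)]
        rw [show List.range (k + 1) = List.range k ++ [k] from List.range_succ]
        simp [show m + 1 - (k + 1) = m - k by omega]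

-- A's second phase: multiply entry i by i!
lemma phase2 (m k : Nat) (h1 : 1 ≤ k) (hk : k ≤ m + 1) :
    (PySem.List.pyRange 1 (k : Int) 1).foldl
      (fun a i => PySem.List.pySetD a i (PySem.List.pyGetD a i 0 * (Nat.factorial i.toNat : Int)))
      ((List.range (m + 1)).map catI)
    = (List.range k).map cfI ++ (List.range' k (m + 1 - k)).map catI := by
  induction k with
  | zero => omega
  | succ k ih =>
      by_cases hk1 : k = 0
      · subst hk1
        rw [show ((1 : Nat) : Int) = 1 by norm_num, PySem.List.pyRange_one_eq_nil (le_refl _)]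
        rw [show List.range (m + 1) = List.range' 0 (m + 1) from List.range_eq_range',
          List.range'_succ]
        simp [List.foldl, cfI, catI, catalan_zero, Nat.factorial,
          show List.range 1 = List.range' 0 1 from List.range_eq_range', List.range'_succ]
      · have hcast : ((k + 1 : Nat) : Int) = (k : Int) + 1 := by push_cast; ring
        rw [hcast, PySem.List.pyRange_one_succ_right (by exact_mod_cast Nat.one_le_iff_ne_zero.2 hk1),
          List.foldl_append, ih (by omega) (by omega)]
        simp only [List.foldl]
        have hrng : List.range' k (m + 1 - k) = k :: List.range' (k + 1) (m - k) := by
          rw [show m + 1 - k = (m - k) + 1 by omega, List.range'_succ]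
        set A := (List.range k).map cfI with hA
        have hAlen : A.length = k := by simp [hA]
        rw [hrng]
        simp only [List.map_cons]
        have hget : PySem.List.pyGetD (A ++ catI k :: (List.range' (k + 1) (m - k)).map catI)
            ((k : Nat) : Int) 0 = catI k := by
          rw [PySem.List.pyGetD_natCast, ← hAlen, getD_append_len]
        rw [hget, PySem.List.pySetD_natCast, ← hAlen, set_append_len, hAlen]
        rw [show ((k : Nat) : Int).toNat = k by omega]
        rw [show List.range (k + 1) = List.range k ++ [k] from List.range_succ]
        simp [cfI, show m + 1 - (k + 1) = m - k by omega]
        exact hA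

lemma prec_eq_ref (m : Nat) : prec (m : Int) = (List.range (m + 1)).map cfI := by
  unfold prec
  simp only []
  have h0 : (PySem.List.pyRange 0 ((m : Int) + 1) 1).map (fun _ => (0 : Int))
      = List.replicate (m + 1) 0 := by
    rw [show ((m : Int) + 1) = ((m + 1 : Nat) : Int) by push_cast; ring,
      PySem.List.pyRange_zero_nat]
    simp [List.eq_replicate_iff]
  rw [h0]
  have h1 : PySem.List.pySetD (List.replicate (m + 1) (0 : Int)) 0 1
      = (1 : Int) :: List.replicate m 0 := by
    rw [show (0 : Int) = ((0 : Nat) : Int) by norm_num, PySem.List.pySetD_natCast,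
      List.replicate_succ, List.set_cons_zero]
  rw [h1]
  rw [show ((m : Int) + 1) = ((m + 1 : Nat) : Int) by push_cast; ring]
  rw [phase1 m (m + 1) (by omega) (le_refl _)]
  simp only [Nat.sub_self, List.replicate_zero, List.append_nil]
  rw [phase2 m (m + 1) (by omega) (le_refl _)]
  simp

lemma prec_alt_eq_ref (m : Nat) : prec_alt (m : Int) = (List.range (m + 1)).map cfI := by
  unfold prec_alt
  rw [alt_loop m]

-- ===== VERDICT (by name: the statement is the Claim_ definition above) =====
theorem prec_spec : Claim_equal_prec := by
  intro n _ hpre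
  unfold Spec_prec
  obtain ⟨m, rfl⟩ : ∃ m : Nat, n = (m : Int) := ⟨n.toNat, by unfold Pre_prec at hpre; omega⟩
  rw [prec_eq_ref m, prec_alt_eq_ref m]
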